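-- pv_equiv track=rewrite | github.com/alexandraback/datacollection | solutions_5634697451274240_1/Python/RedJay/b.py | countStack
-- ===== SOURCE A (Python) =====
-- def flipVal(x):
--     if x == 0:
--         return 1
--     else:
--         return 0
--
-- def countStack(s):
--     if len(s) == 0:
--         return 0
--     elif len(s) == 1:
--         return flipVal(s[0])
--     else:
--         start = s[0]
--         for i in range(1,len(s)):
--             if s[i] != start:
--                 return 1 + countStack(s[i:])
--         return flipVal(start)
-- ===== SOURCE B (Python) =====
-- def countStack(s):
--     if not s:
--         return 0
--     changes = sum(1 for a, b in zip(s, s[1:]) if a != b)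
--     return changes + (1 if s[-1] == 0 else 0)
-- ===== Notes on version B (the rewrite author's own statement) =====
-- stated objective: faster
-- what changed: Replaced A's recursion-on-suffix with rescanning (quadratic in the number of runs) by a single pass counting adjacent differences plus a flip of the last element.
import Mathlib
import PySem

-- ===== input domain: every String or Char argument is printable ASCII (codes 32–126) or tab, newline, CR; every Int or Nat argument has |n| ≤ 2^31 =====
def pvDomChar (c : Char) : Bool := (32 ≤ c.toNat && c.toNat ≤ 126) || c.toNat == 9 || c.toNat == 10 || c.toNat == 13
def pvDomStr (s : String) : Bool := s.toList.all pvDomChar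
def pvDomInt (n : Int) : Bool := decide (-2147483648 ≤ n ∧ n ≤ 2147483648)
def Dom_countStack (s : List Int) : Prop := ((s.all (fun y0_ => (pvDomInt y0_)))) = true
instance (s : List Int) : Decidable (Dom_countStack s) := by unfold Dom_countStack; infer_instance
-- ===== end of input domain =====

-- B replaces A's quadratic recursion-on-suffix with one linear pass counting adjacent differences plus a flip of the last element.

-- ===== PORT A =====
def flipVal (x : Int) : Int := if x = 0 then 1 else 0

mutual
-- the dispatcher: len 0 / len 1 / otherwise scan from index 1
def countStack (s : List Int) : Int :=
  match s with
  | [] => 0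
  | [x] => flipVal x
  | x :: y :: t => countStackGo x (y :: t)
termination_by 2 * s.length
-- A's for-loop over i in range(1, len(s)): find first element ≠ start, recurse on that suffix
def countStackGo (start : Int) (l : List Int) : Int :=
  match l with
  | [] => flipVal start
  | h :: t => if h ≠ start then 1 + countStack (h :: t) else countStackGo start t
termination_by 2 * l.length + 1
end

-- ===== PORT B =====
def countStack_alt (s : List Int) : Int :=
  match s with
  | [] => 0
  | _ :: _ =>
    let changes : Int := ((s.zip (s.drop 1)).countP (fun p => p.1 != p.2) : Nat)
    changes + (if s.getLast! = 0 then 1 else 0)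

-- ===== PRECONDITION & SPEC =====
def Spec_countStack (s : List Int) (out : Int) : Prop := out = countStack_alt s
instance (s : List Int) (out : Int) : Decidable (Spec_countStack s out) := by unfold Spec_countStack; infer_instance

-- ===== CLAIM (what is proved, stated in full; the proofs are below) =====
def Claim_equal_countStack : Prop := ∀ (s : List Int), Dom_countStack s → Spec_countStack s (countStack s)

-- ===== LEMMAS AND PROOFS =====

-- common structural recursion both sides are reduced to
def cAux : List Int → Int
  | [] => 0
  | [x] => flipVal x
  | x :: y :: t => (if y ≠ x then 1 else 0) + cAux (y :: t)

theorem alt_eq_cAux (s : List Int) : countStack_alt s = cAux s := by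
  induction s with
  | nil => rfl
  | cons x t ih =>
    cases t with
    | nil => simp [countStack_alt, cAux, flipVal, List.countP]
    | cons y u =>
      rw [show cAux (x :: y :: u) = (if y ≠ x then 1 else 0) + cAux (y :: u) from rfl, ← ih]
      simp only [countStack_alt, List.drop_succ_cons, List.drop_zero, List.zip_cons_cons,
        List.countP_cons]
      rw [show (x :: y :: u).getLast! = (y :: u).getLast! by simp]
      by_cases h : y = x <;> simp [h, bne] <;> omega

theorem a_eq_cAux :
    ∀ n : Nat, (∀ s : List Int, s.length ≤ n → countStack s = cAux s) ∧
      (∀ (start : Int) (l : List Int), l.length ≤ n → countStackGo start l = cAux (start :: l)) := by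
  intro n
  induction n with
  | zero =>
    constructor
    · intro s hs; rw [List.length_eq_zero_iff.mp (Nat.le_zero.mp hs)]; simp [countStack, cAux]
    · intro start l hl; rw [List.length_eq_zero_iff.mp (Nat.le_zero.mp hl)]; simp [countStackGo, cAux, flipVal]
  | succ n ih =>
    have hP : ∀ s : List Int, s.length ≤ n + 1 → countStack s = cAux s := by
      intro s hs
      match s with
      | [] => simp [countStack, cAux]
      | [x] => simp [countStack, cAux, flipVal]
      | x :: y :: t =>
        rw [show countStack (x :: y :: t) = countStackGo x (y :: t) by simp [countStack],
          ih.2 x (y :: t) (by simpa using Nat.le_of_succ_le_succ hs)]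
    refine ⟨hP, ?_⟩
    intro start l hl
    match l with
    | [] => simp [countStackGo, cAux, flipVal]
    | h :: t =>
      rw [show countStackGo start (h :: t)
            = if h ≠ start then 1 + countStack (h :: t) else countStackGo start t by
          simp [countStackGo]]
      by_cases hh : h = start
      · rw [if_neg (by simp [hh]), ih.2 start t (by simpa using Nat.le_of_succ_le_succ hl)]
        simp [cAux, hh]
      · rw [if_pos (by simp [hh]), hP (h :: t) hl]
        simp [cAux, hh]

-- ===== VERDICT (by name: the statement is the Claim_ definition above) =====
theorem countStack_spec : Claim_equal_countStack := by
  intro s _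
  unfold Spec_countStack
  rw [alt_eq_cAux, (a_eq_cAux s.length).1 s le_rfl]
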